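-- pv_equiv track=rewrite | github.com/OzgurKucet/BilimselHesaplama | 1-Odev-Projeler-Bilimsel/1.Soru-BirStringVeTextAl/merhaba.py | sembolleriTemizle
-- ===== SOURCE A (Python) =====
-- def sembolleriTemizle(tumKelimeler):
--     sembolsuzkelimeler = []
--     semboller = "!'@.^#<>+-_{}\",[]-=:;*/’)(&"
--     for kelime in tumKelimeler:
--         for sembol in semboller:
--             if sembol in kelime:
--                 kelime = kelime.replace(sembol,"")
--         if(len(kelime)>0):
--             sembolsuzkelimeler.append(kelime)
--     return sembolsuzkelimeler
-- ===== SOURCE B (Python) =====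
-- def sembolleriTemizle(tumKelimeler):
--     semboller = set("!'@.^#<>+-_{}\",[]-=:;*/’)(&")
--     temizler = (''.join(c for c in kelime if c not in semboller) for kelime in tumKelimeler)
--     return [t for t in temizler if t]
-- ===== Notes on version B (the rewrite author's own statement) =====
-- stated objective: idiomatic
-- what changed: B traverses each word's characters once, keeping those not in a symbol set, instead of A's loop over the symbol alphabet with membership test and replace per symbol.
import Mathlib
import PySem

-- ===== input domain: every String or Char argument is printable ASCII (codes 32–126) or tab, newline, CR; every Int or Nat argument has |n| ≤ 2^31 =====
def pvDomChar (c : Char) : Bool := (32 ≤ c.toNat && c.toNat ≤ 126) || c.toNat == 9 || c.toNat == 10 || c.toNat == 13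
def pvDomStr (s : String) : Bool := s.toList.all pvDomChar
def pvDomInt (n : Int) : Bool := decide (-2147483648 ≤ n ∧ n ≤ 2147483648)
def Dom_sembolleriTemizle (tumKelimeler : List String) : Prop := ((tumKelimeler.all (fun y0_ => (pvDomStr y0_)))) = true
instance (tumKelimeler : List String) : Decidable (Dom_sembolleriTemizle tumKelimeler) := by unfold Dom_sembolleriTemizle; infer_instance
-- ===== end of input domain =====

-- B filters each word's characters against a symbol set in one pass (A loops over the
-- symbol alphabet calling replace); objective: idiomatic, same observable behaviour.

-- ===== PORT A =====
def pvSemboller : String := "!'@.^#<>+-_{}\",[]-=:;*/’)(&"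

def sembolleriTemizle (tumKelimeler : List String) : List String :=
  tumKelimeler.foldl (fun sembolsuzkelimeler kelime0 =>
    let kelime := pvSemboller.toList.foldl
      (fun kelime sembol =>
        if PySem.Str.isIn (String.ofList [sembol]) kelime then
          PySem.Str.replace kelime (String.ofList [sembol]) ""
        else kelime) kelime0
    if 0 < PySem.Str.len kelime then sembolsuzkelimeler ++ [kelime] else sembolsuzkelimeler) []

-- ===== PORT B =====
def pvSembollerSet : List Char := PySem.Set.ofList pvSemboller.toList

def sembolleriTemizle_alt (tumKelimeler : List String) : List String :=
  (tumKelimeler.map (fun kelime =>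
      String.ofList (kelime.toList.filter (fun c => !pvSembollerSet.contains c)))).filter
    (fun t => !t.toList.isEmpty)

-- ===== PRECONDITION & SPEC =====
def Spec_sembolleriTemizle (tumKelimeler : List String) (out : List String) : Prop := out = sembolleriTemizle_alt tumKelimeler
instance (tumKelimeler : List String) (out : List String) : Decidable (Spec_sembolleriTemizle tumKelimeler out) := by unfold Spec_sembolleriTemizle; infer_instance

-- ===== CLAIM (what is proved, stated in full; the proofs are below) =====
def Claim_equal_sembolleriTemizle : Prop := ∀ (tumKelimeler : List String), Dom_sembolleriTemizle tumKelimeler → Spec_sembolleriTemizle tumKelimeler (sembolleriTemizle tumKelimeler)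

-- ===== LEMMAS AND PROOFS =====

-- replace.go with a one-char pattern and empty replacement is a filter
theorem pv_go_single (c : Char) (l acc : List Char) (fuel : Nat) (h : l.length ≤ fuel) :
    PySem.Chars.replace.go [c] [] fuel l acc = acc.reverse ++ l.filter (fun x => x != c) := by
  induction l generalizing fuel acc with
  | nil =>
    cases fuel <;> simp [PySem.Chars.replace.go]
  | cons c' t ih =>
    cases fuel with
    | zero => simp at h
    | succ f =>
      simp only [PySem.Chars.replace.go]
      by_cases hc : c = c'
      · subst hc
        simp only [List.isPrefixOf, BEq.refl, Bool.true_and, if_true, List.length_cons] at *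
        simp only [List.length_nil, Nat.zero_add, List.drop_succ_cons, List.drop_zero,
          List.reverse_nil, List.nil_append]
        rw [ih acc f (by omega)]
        simp
      · have hpre : [c].isPrefixOf (c' :: t) = false := by
          simp [List.isPrefixOf]
          exact fun h => absurd h hc
        rw [hpre]
        simp only [Bool.false_eq_true, if_false]
        rw [ih (c' :: acc) f (by simpa using Nat.succ_le_succ_iff.mp (by simpa using h))]
        simp [bne_iff_ne, Ne.symm hc]

theorem pv_replace_single (c : Char) (s : List Char) :
    PySem.Chars.replace s [c] [] = s.filter (fun x => x != c) := by
  rw [PySem.Chars.replace]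
  simp only [List.isEmpty_cons, Bool.false_eq_true, if_false]
  simpa using pv_go_single c s [] s.length le_rfl

theorem pv_isIn_single (c : Char) (s : List Char) :
    PySem.Chars.isIn [c] s = s.contains c := by
  by_cases h : c ∈ s
  · rw [List.contains_eq_mem]
    simp only [h, decide_true]
    rw [PySem.Chars.isIn_iff_infix]
    exact (List.singleton_infix_iff c s).mpr h
  · rw [List.contains_eq_mem]
    simp only [h, decide_false]
    rw [PySem.Chars.isIn_eq_false_iff]
    exact fun hinf => h ((List.singleton_infix_iff c s).mp hinf)

-- A's inner loop over the symbol alphabet, on the character list, is one filter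
theorem pv_symloop (syms : List Char) (cs : List Char) :
    syms.foldl (fun k c => if PySem.Chars.isIn [c] k then PySem.Chars.replace k [c] [] else k) cs
      = cs.filter (fun ch => !syms.contains ch) := by
  induction syms generalizing cs with
  | nil => simp
  | cons c t ih =>
    simp only [List.foldl_cons]
    have hstep : (if PySem.Chars.isIn [c] cs then PySem.Chars.replace cs [c] [] else cs)
        = cs.filter (fun x => x != c) := by
      by_cases h : c ∈ cs
      · rw [if_pos (by rw [pv_isIn_single, List.contains_eq_mem]; simpa)]
        exact pv_replace_single c cs
      · rw [if_neg (by rw [pv_isIn_single, List.contains_eq_mem]; simpa)]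
        refine (List.filter_eq_self.mpr ?_).symm
        intro a ha
        simp only [bne_iff_ne, ne_eq]
        exact fun he => h (he ▸ ha)
    rw [hstep, ih, List.filter_filter]
    apply List.filter_congr
    intro a _
    by_cases hca : c = a
    · subst hca; simp [bne]
    · simp [bne, Ne.symm hca]

-- the String-level inner loop of port A, seen through toList
theorem pv_symloop_str (syms : List Char) (k : String) :
    (syms.foldl (fun kelime sembol =>
        if PySem.Str.isIn (String.ofList [sembol]) kelime then
          PySem.Str.replace kelime (String.ofList [sembol]) ""
        else kelime) k).toList
      = k.toList.filter (fun ch => !syms.contains ch) := by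
  have h : ∀ (syms : List Char) (k : String),
      (syms.foldl (fun kelime sembol =>
        if PySem.Str.isIn (String.ofList [sembol]) kelime then
          PySem.Str.replace kelime (String.ofList [sembol]) ""
        else kelime) k).toList
      = syms.foldl (fun k c => if PySem.Chars.isIn [c] k then PySem.Chars.replace k [c] [] else k)
          k.toList := by
    intro syms
    induction syms with
    | nil => intro k; rfl
    | cons c t ih =>
      intro k
      simp only [List.foldl_cons]
      rw [ih]
      congr 1
      by_cases hc : PySem.Chars.isIn [c] k.toList = true
      · rw [if_pos (by simpa [PySem.Str.isIn, String.toList_ofList] using hc), if_pos hc]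
        simp [PySem.Str.toList_replace, String.toList_ofList, String.toList_empty]
      · rw [if_neg (by simpa [PySem.Str.isIn, String.toList_ofList] using hc), if_neg hc]
  rw [h, pv_symloop]

theorem pv_contains_set (c : Char) :
    pvSembollerSet.contains c = pvSemboller.toList.contains c := by
  simp only [List.contains_eq_mem, pvSembollerSet]
  simp [PySem.Set.mem_ofList]

theorem pv_clean_eq (k : String) :
    (pvSemboller.toList.foldl (fun kelime sembol =>
        if PySem.Str.isIn (String.ofList [sembol]) kelime then
          PySem.Str.replace kelime (String.ofList [sembol]) ""
        else kelime) k)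
      = String.ofList (k.toList.filter (fun c => !pvSembollerSet.contains c)) := by
  apply String.toList_inj.mp
  rw [String.toList_ofList, pv_symloop_str]
  apply List.filter_congr
  intro a _
  rw [pv_contains_set]

theorem pv_outer (ws : List String) (acc : List String) :
    ws.foldl (fun sembolsuzkelimeler kelime0 =>
      let kelime := pvSemboller.toList.foldl
        (fun kelime sembol =>
          if PySem.Str.isIn (String.ofList [sembol]) kelime then
            PySem.Str.replace kelime (String.ofList [sembol]) ""
          else kelime) kelime0
      if 0 < PySem.Str.len kelime then sembolsuzkelimeler ++ [kelime] else sembolsuzkelimeler) acc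
    = acc ++ (ws.map (fun kelime =>
        String.ofList (kelime.toList.filter (fun c => !pvSembollerSet.contains c)))).filter
        (fun t => !t.toList.isEmpty) := by
  induction ws generalizing acc with
  | nil => simp only [List.foldl_nil, List.map_nil, List.filter_nil, List.append_nil]
  | cons w t ih =>
    simp only [List.foldl_cons, List.map_cons, List.filter_cons]
    rw [pv_clean_eq w]
    set cleaned := String.ofList (w.toList.filter (fun c => !pvSembollerSet.contains c)) with hc
    have hlen : PySem.Str.len cleaned = cleaned.toList.length := PySem.Str.len_eq cleaned
    by_cases h : cleaned.toList.isEmpty = true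
    · have hnp : ¬ 0 < PySem.Str.len cleaned := by
        rw [hlen, List.isEmpty_iff.mp h]
        simp
      rw [if_neg hnp]
      simp only [h, Bool.not_true, Bool.false_eq_true, if_false]
      exact ih acc
    · have hpos : 0 < PySem.Str.len cleaned := by
        rw [hlen]
        have hne : cleaned.toList ≠ [] := by
          intro hnil; rw [hnil] at h; simp at h
        exact_mod_cast List.length_pos_of_ne_nil hne
      rw [if_pos hpos]
      simp only [Bool.not_eq_true] at h
      simp only [h, Bool.not_false, if_true]
      rw [ih (acc ++ [cleaned])]
      simp

-- ===== VERDICT (by name: the statement is the Claim_ definition above) =====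
theorem sembolleriTemizle_spec : Claim_equal_sembolleriTemizle := by
  intro ws _
  show sembolleriTemizle ws = sembolleriTemizle_alt ws
  unfold sembolleriTemizle sembolleriTemizle_alt
  rw [pv_outer ws []]
  rw [List.nil_append]
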